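-- pv_equiv track=rewrite | github.com/RodrigoAnt93/Python3_Luiz_Otavio_Udemy | Python_Basico_Intermediario/Exerc_58.py | calculadora_preco
-- ===== SOURCE A (Python) =====
-- def calculadora_preco(tf1, vqr1, tf2, vqr2):
--     tf1 = tf1
--     vqr1 = vqr1
--     tf2 = tf2
--     vqr2 = vqr2
--     gen = [g for g in range(1, 1000)]
--     for conv in gen:
--         emprsa_1 = tf1 + (vqr1 * conv)
--         emprsa_2 = tf2 + (vqr2 * conv)
--         if emprsa_1 == emprsa_2:
--             if emprsa_1 < emprsa_2:
--                 return f'Se a corrida tiver {conv}km, tanto faz a empresa. Mas, se for menos que isso, a empresa_1 é mais barata.'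
--             else:
--                 return f'Se a corrida tiver {conv}km, tanto faz a empresa. Mas, se for menos que isso, a empresa_2 é mais barata.'
-- ===== SOURCE B (Python) =====
-- def calculadora_preco(tf1, vqr1, tf2, vqr2):
--     def msg(c):
--         return f'Se a corrida tiver {c}km, tanto faz a empresa. Mas, se for menos que isso, a empresa_2 é mais barata.'
--     d = vqr2 - vqr1
--     if d == 0:
--         return msg(1) if tf1 == tf2 else None
--     num = tf1 - tf2
--     if num % d == 0:
--         conv = num // d
--         if 1 <= conv <= 999:
--             return msg(conv)
--     return None
-- ===== Notes on version B (the rewrite author's own statement) =====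
-- stated objective: simpler
-- what changed: B solves the linear equation tf1+vqr1*c = tf2+vqr2*c in closed form (one exact integer division plus a 1..999 range check) instead of A's scan over conv = 1..999 with a dead comparison branch.
import Mathlib
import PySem

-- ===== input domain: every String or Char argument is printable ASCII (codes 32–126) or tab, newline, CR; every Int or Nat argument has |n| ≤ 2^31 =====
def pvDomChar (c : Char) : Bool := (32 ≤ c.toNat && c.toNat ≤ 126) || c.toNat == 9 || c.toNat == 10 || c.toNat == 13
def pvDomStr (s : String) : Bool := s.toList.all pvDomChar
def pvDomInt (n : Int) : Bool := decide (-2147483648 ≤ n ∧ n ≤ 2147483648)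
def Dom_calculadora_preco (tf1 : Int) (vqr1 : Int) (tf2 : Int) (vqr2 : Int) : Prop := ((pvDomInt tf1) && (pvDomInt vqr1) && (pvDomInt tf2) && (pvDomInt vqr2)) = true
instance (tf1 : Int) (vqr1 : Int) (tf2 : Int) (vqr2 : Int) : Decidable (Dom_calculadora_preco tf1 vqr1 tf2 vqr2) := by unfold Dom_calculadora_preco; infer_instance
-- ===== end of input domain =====

-- B solves the linear price equation in closed form (one exact division + range check) instead of A's scan over conv = 1..999.

-- ===== PORT A =====
def pvMsg1 (conv : Int) : String :=
  "Se a corrida tiver " ++ PySem.Int.toStr conv ++ "km, tanto faz a empresa. Mas, se for menos que isso, a empresa_1 é mais barata."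
def pvMsg2 (conv : Int) : String :=
  "Se a corrida tiver " ++ PySem.Int.toStr conv ++ "km, tanto faz a empresa. Mas, se for menos que isso, a empresa_2 é mais barata."

def pvLoopA (tf1 vqr1 tf2 vqr2 : Int) : List Int → Option String
  | [] => none
  | conv :: rest =>
    let emprsa_1 := tf1 + (vqr1 * conv)
    let emprsa_2 := tf2 + (vqr2 * conv)
    if emprsa_1 = emprsa_2 then
      if emprsa_1 < emprsa_2 then some (pvMsg1 conv) else some (pvMsg2 conv)
    else pvLoopA tf1 vqr1 tf2 vqr2 rest

def calculadora_preco (tf1 : Int) (vqr1 : Int) (tf2 : Int) (vqr2 : Int) : Option String :=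
  pvLoopA tf1 vqr1 tf2 vqr2 (PySem.List.pyRange 1 1000 1)

-- ===== PORT B =====
def calculadora_preco_alt (tf1 : Int) (vqr1 : Int) (tf2 : Int) (vqr2 : Int) : Option String :=
  let d := vqr2 - vqr1
  if d = 0 then
    if tf1 = tf2 then some (pvMsg2 1) else none
  else
    let num := tf1 - tf2
    if PySem.Int.mod num d = 0 then
      let conv := PySem.Int.floordiv num d
      if 1 ≤ conv ∧ conv ≤ 999 then some (pvMsg2 conv) else none
    else none

-- ===== PRECONDITION & SPEC =====
def Spec_calculadora_preco (tf1 : Int) (vqr1 : Int) (tf2 : Int) (vqr2 : Int) (out : Option String) : Prop := out = calculadora_preco_alt tf1 vqr1 tf2 vqr2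
instance (tf1 : Int) (vqr1 : Int) (tf2 : Int) (vqr2 : Int) (out : Option String) : Decidable (Spec_calculadora_preco tf1 vqr1 tf2 vqr2 out) := by unfold Spec_calculadora_preco; infer_instance

-- ===== CLAIM (what is proved, stated in full; the proofs are below) =====
def Claim_equal_calculadora_preco : Prop := ∀ (tf1 : Int) (vqr1 : Int) (tf2 : Int) (vqr2 : Int), Dom_calculadora_preco tf1 vqr1 tf2 vqr2 → Spec_calculadora_preco tf1 vqr1 tf2 vqr2 (calculadora_preco tf1 vqr1 tf2 vqr2)

-- ===== LEMMAS AND PROOFS =====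

-- A's loop is 'find the first conv with equal prices, emit the empresa_2 message'
-- (the empresa_1 branch is dead: under equality, emprsa_1 < emprsa_2 is false).
theorem pvLoopA_eq_find (tf1 vqr1 tf2 vqr2 : Int) (l : List Int) :
    pvLoopA tf1 vqr1 tf2 vqr2 l
      = (l.find? (fun c => tf1 + vqr1 * c == tf2 + vqr2 * c)).map pvMsg2 := by
  induction l with
  | nil => rfl
  | cons a rest ih =>
    simp only [pvLoopA, List.find?_cons]
    by_cases h : tf1 + vqr1 * a = tf2 + vqr2 * a
    · simp [h]
    · have hb : (tf1 + vqr1 * a == tf2 + vqr2 * a) = false := by simp [h]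
      simp [h, hb, ih]

theorem pv_find?_unique (p : Int → Bool) (q : Int) (h : ∀ c, p c = true ↔ c = q)
    (l : List Int) : l.find? p = if q ∈ l then some q else none := by
  induction l with
  | nil => simp
  | cons a rest ih =>
    by_cases ha : a = q
    · subst ha
      simp [(h a).mpr rfl]
    · have hpa : p a = false := by
        cases hp : p a
        · rfl
        · exact absurd ((h a).mp hp) ha
      have hqa : ¬ q = a := fun hh => ha hh.symm
      simp [hpa, ih, hqa]

-- ===== VERDICT (by name: the statement is the Claim_ definition above) =====
theorem calculadora_preco_spec : Claim_equal_calculadora_preco := by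
  intro tf1 vqr1 tf2 vqr2 _hd
  unfold Spec_calculadora_preco calculadora_preco calculadora_preco_alt
  rw [pvLoopA_eq_find]
  by_cases hd : vqr2 - vqr1 = 0
  · -- same per-km price: equal iff the fixed fees are equal, first match is conv = 1
    have hv : vqr2 = vqr1 := by omega
    by_cases ht : tf1 = tf2
    · have : PySem.List.pyRange 1 1000 1 = 1 :: PySem.List.pyRange 2 1000 1 := by
        have := PySem.List.pyRange_one_cons (a := 1) (b := 1000) (by norm_num)
        simpa using this
      rw [this]
      simp [hv, ht]
    · have hfalse : ∀ c : Int,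
          ((fun c => tf1 + vqr1 * c == tf2 + vqr2 * c) c) = false := by
        intro c
        simp only [beq_eq_false_iff_ne, ne_eq, hv]
        omega
      rw [List.find?_eq_none.mpr (fun x _ => by simp [hfalse x])]
      simp [hd, ht]
  · -- distinct per-km prices: at most one solution, the exact quotient
    by_cases hm : PySem.Int.mod (tf1 - tf2) (vqr2 - vqr1) = 0
    · set q := PySem.Int.floordiv (tf1 - tf2) (vqr2 - vqr1) with hq
      have hqd : q * (vqr2 - vqr1) = tf1 - tf2 := by
        have h := PySem.Int.floordiv_mul_add_mod (tf1 - tf2) (vqr2 - vqr1)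
        rw [hm, add_zero] at h
        exact h
      have hiff : ∀ c : Int,
          ((fun c => tf1 + vqr1 * c == tf2 + vqr2 * c) c) = true ↔ c = q := by
        intro c
        simp only [beq_iff_eq]
        constructor
        · intro h
          have h2 : c * (vqr2 - vqr1) = q * (vqr2 - vqr1) := by
            linear_combination -h - hqd
          exact mul_right_cancel₀ hd h2
        · intro h; subst h
          linear_combination -hqd
      rw [pv_find?_unique _ q hiff]
      have hmem : (q ∈ PySem.List.pyRange 1 1000 1) ↔ (1 ≤ q ∧ q ≤ 999) := by
        rw [PySem.List.mem_pyRange_one]; omega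
      by_cases hr : 1 ≤ q ∧ q ≤ 999
      · simp [hd, hm, hr, hmem.mpr hr, ← hq]
      · have hnm : ¬ q ∈ PySem.List.pyRange 1 1000 1 := fun h => hr (hmem.mp h)
        simp [hd, hm, hr, hnm, ← hq]
    · -- no exact solution: the scan never matches
      have hfalse : ∀ c : Int,
          ((fun c => tf1 + vqr1 * c == tf2 + vqr2 * c) c) = false := by
        intro c
        simp only [beq_eq_false_iff_ne, ne_eq]
        intro h
        apply hm
        rw [PySem.Int.mod_eq_zero_iff_dvd]
        exact ⟨c, by linear_combination h⟩
      rw [List.find?_eq_none.mpr (fun x _ => by simp [hfalse x])]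
      simp [hd, hm]
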